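-- pv_equiv track=rewrite | github.com/immijimmi/pythontemplate | tools/update.py | filter_tags
-- ===== SOURCE A (Python) =====
-- from typing import Optional
--
-- def filter_tags(
--         chronological_tags: list[str],
--         start_from: Optional[str] = None, blacklist: set[str] = set()
-- ) -> list[str]:
--     result = []
--
--     is_past_start = (True if (start_from is None) else False)
--     for tag in chronological_tags:
--         if not is_past_start:
--             if tag == start_from:
--                 is_past_start = True
--             else:
--                 continue
--
--         if tag in blacklist:
--             continue
--
--         result.append(tag)
--
--     return result
-- ===== SOURCE B (Python) =====
-- from typing import Optional
--
-- def filter_tags(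
--         chronological_tags: list[str],
--         start_from: Optional[str] = None, blacklist: set[str] = set()
-- ) -> list[str]:
--     if start_from is None:
--         start_idx = 0
--     else:
--         try:
--             start_idx = chronological_tags.index(start_from)
--         except ValueError:
--             return []
--     return [t for t in chronological_tags[start_idx:] if t not in blacklist]
-- ===== Notes on version B (the rewrite author's own statement) =====
-- stated objective: simpler
-- what changed: Replaced the single stateful loop with an is_past_start flag by a locate phase (list.index / ValueError -> []) followed by a slice-and-filter comprehension.
import Mathlib
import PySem

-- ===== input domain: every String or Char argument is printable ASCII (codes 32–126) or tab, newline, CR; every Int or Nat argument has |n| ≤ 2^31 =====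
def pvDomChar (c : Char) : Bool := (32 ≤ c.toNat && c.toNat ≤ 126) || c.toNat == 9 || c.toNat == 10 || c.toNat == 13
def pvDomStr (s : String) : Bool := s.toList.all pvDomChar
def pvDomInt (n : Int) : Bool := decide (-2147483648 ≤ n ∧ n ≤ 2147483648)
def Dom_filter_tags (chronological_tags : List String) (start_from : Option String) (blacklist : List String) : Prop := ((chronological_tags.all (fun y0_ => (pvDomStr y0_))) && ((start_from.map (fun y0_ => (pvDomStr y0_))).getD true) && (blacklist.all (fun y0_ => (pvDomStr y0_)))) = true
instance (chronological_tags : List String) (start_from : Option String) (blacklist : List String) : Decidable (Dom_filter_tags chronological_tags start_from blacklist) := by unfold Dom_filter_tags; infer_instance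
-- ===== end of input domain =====

-- B replaces A's fused stateful loop (is_past_start flag) by a locate phase (index, [] if absent)
-- followed by a slice-and-filter comprehension; same return value, objective: simpler.

-- ===== PORT A =====
-- the for-loop of A: state = (is_past_start, result), branches in A's order
def filter_tags_go (tags : List String) (start_from : Option String) (blacklist : List String)
    (is_past : Bool) (result : List String) : List String :=
  match tags with
  | [] => result
  | tag :: rest =>
    if !is_past then
      if some tag = start_from then
        -- is_past_start := True, then fall through to the blacklist check
        if blacklist.contains tag then filter_tags_go rest start_from blacklist true result
        else filter_tags_go rest start_from blacklist true (result ++ [tag])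
      else filter_tags_go rest start_from blacklist false result   -- continue
    else
      if blacklist.contains tag then filter_tags_go rest start_from blacklist is_past result
      else filter_tags_go rest start_from blacklist is_past (result ++ [tag])

def filter_tags (chronological_tags : List String) (start_from : Option String) (blacklist : List String) : List String :=
  filter_tags_go chronological_tags start_from blacklist (start_from = none) []

-- ===== PORT B =====
def filter_tags_alt (chronological_tags : List String) (start_from : Option String) (blacklist : List String) : List String :=
  match start_from with
  | none => (PySem.List.slice chronological_tags (some 0) none).filter (fun t => !blacklist.contains t)
  | some s =>
    match PySem.List.index? chronological_tags s with
    | none => []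
    | some i => (PySem.List.slice chronological_tags (some (i : Int)) none).filter (fun t => !blacklist.contains t)

-- ===== PRECONDITION & SPEC =====
def Spec_filter_tags (chronological_tags : List String) (start_from : Option String) (blacklist : List String) (out : List String) : Prop := out = filter_tags_alt chronological_tags start_from blacklist
instance (chronological_tags : List String) (start_from : Option String) (blacklist : List String) (out : List String) : Decidable (Spec_filter_tags chronological_tags start_from blacklist out) := by unfold Spec_filter_tags; infer_instance

-- ===== CLAIM (what is proved, stated in full; the proofs are below) =====
def Claim_equal_filter_tags : Prop := ∀ (chronological_tags : List String) (start_from : Option String) (blacklist : List String), Dom_filter_tags chronological_tags start_from blacklist → Spec_filter_tags chronological_tags start_from blacklist (filter_tags chronological_tags start_from blacklist)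

-- ===== LEMMAS AND PROOFS =====

-- once past the start, A's loop is a filter appended to the accumulator
theorem go_true (tags : List String) (sf : Option String) (bl : List String) (acc : List String) :
    filter_tags_go tags sf bl true acc = acc ++ tags.filter (fun t => !bl.contains t) := by
  induction tags generalizing acc with
  | nil => simp [filter_tags_go]
  | cons t rest ih =>
    by_cases hb : t ∈ bl
    · simp [filter_tags_go, List.filter_cons, hb, ih]
    · simp [filter_tags_go, List.filter_cons, hb, ih]

-- before the start: the loop drops elements until the first occurrence of s
theorem go_false (tags : List String) (s : String) (bl : List String) (acc : List String) :
    filter_tags_go tags (some s) bl false acc =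
      match PySem.List.index? tags s with
      | none => acc
      | some i => acc ++ (tags.drop i).filter (fun t => !bl.contains t) := by
  induction tags generalizing acc with
  | nil => simp [filter_tags_go, PySem.List.index?]
  | cons t rest ih =>
    by_cases h : t = s
    · subst h
      rw [PySem.List.index?_cons_self]
      by_cases hb : t ∈ bl
      · simp [filter_tags_go, List.filter_cons, hb, go_true]
      · simp [filter_tags_go, List.filter_cons, hb, go_true]
    · rw [PySem.List.index?_cons_of_ne rest h]
      have hne : ¬ (some t = some s) := by simp [h]
      simp only [filter_tags_go, Bool.not_false, if_true, if_neg hne, ih]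
      cases hidx : PySem.List.index? rest s <;> simp

theorem filter_tags_eq (tags : List String) (sf : Option String) (bl : List String) :
    filter_tags tags sf bl = filter_tags_alt tags sf bl := by
  cases sf with
  | none =>
    simp only [filter_tags, filter_tags_alt, decide_true, go_true, List.nil_append]
    rw [show ((0 : Int) = ((0 : Nat) : Int)) from rfl, PySem.List.slice_from_natCast]
    simp
  | some s =>
    simp only [filter_tags, filter_tags_alt]
    rw [show (decide ((some s : Option String) = none)) = false from by simp, go_false]
    cases hidx : PySem.List.index? tags s with
    | none => simp
    | some i => simp [PySem.List.slice_from_natCast]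

-- ===== VERDICT (by name: the statement is the Claim_ definition above) =====
theorem filter_tags_spec : Claim_equal_filter_tags := by
  intro tags sf bl _
  unfold Spec_filter_tags
  exact filter_tags_eq tags sf bl
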